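-- pv_equiv track=rewrite | github.com/CharlMeyers/COS720 | preprocessor.py | joinSubjectHeaderToString
-- ===== SOURCE A (Python) =====
-- def joinSubjectHeaderToString(input, subjectLine):
-- 	headerResult = [i for i in input if "subject:" in i.lower()]
-- 	ccHeaderResult = [i for i in input if "cc:" in i.lower() and "bcc:" not in i.lower() and "x-cc:" not in i.lower()]
-- 	mimeHeaderResult = [i for i in input if "mime-version:" in i.lower()]
--
-- 	if len(headerResult) > 0:
-- 		headerIndexInInput = input.index(headerResult[0])
-- 		if len(ccHeaderResult) > 0:
-- 			nextHeaderIndexInInput = input.index(ccHeaderResult[0])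
-- 		else:
-- 			nextHeaderIndexInInput = input.index(mimeHeaderResult[0])
--
-- 		for i in range(headerIndexInInput, nextHeaderIndexInInput):
-- 			input.pop(headerIndexInInput)
--
-- 		input.insert(headerIndexInInput, subjectLine)
--
-- 	return input
-- ===== SOURCE B (Python) =====
-- def joinSubjectHeaderToString(input, subjectLine):
--     # One pass recording the first subject/cc/mime indices, then one slice assignment.
--     subjectIdx = ccIdx = mimeIdx = None
--     for i, line in enumerate(input):
--         low = line.lower()
--         if subjectIdx is None and "subject:" in low:
--             subjectIdx = i
--         if ccIdx is None and "cc:" in low and "bcc:" not in low and "x-cc:" not in low: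
--             ccIdx = i
--         if mimeIdx is None and "mime-version:" in low:
--             mimeIdx = i
--     if subjectIdx is None:
--         return input
--     end = ccIdx if ccIdx is not None else mimeIdx
--     if end is None:
--         return input  # A raises IndexError here
--     input[subjectIdx:end] = [subjectLine]
--     return input
-- ===== Notes on version B (the rewrite author's own statement) =====
-- stated objective: simpler
-- what changed: Replaced three filtering comprehensions plus two .index rescans plus a pop-one-at-a-time loop by a single enumerate pass recording the three first-match indices and one slice assignment.
-- crash fix: When a line containing 'subject:' is present but no cc line and no mime-version line, A raises IndexError (mimeHeaderResult[0] on an empty list); B returns input unchanged. — e.g. on joinSubjectHeaderToString(["Subject: hi"], "Subject: new"): A raises IndexError, B returns ["Subject: hi"]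
import Mathlib
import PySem

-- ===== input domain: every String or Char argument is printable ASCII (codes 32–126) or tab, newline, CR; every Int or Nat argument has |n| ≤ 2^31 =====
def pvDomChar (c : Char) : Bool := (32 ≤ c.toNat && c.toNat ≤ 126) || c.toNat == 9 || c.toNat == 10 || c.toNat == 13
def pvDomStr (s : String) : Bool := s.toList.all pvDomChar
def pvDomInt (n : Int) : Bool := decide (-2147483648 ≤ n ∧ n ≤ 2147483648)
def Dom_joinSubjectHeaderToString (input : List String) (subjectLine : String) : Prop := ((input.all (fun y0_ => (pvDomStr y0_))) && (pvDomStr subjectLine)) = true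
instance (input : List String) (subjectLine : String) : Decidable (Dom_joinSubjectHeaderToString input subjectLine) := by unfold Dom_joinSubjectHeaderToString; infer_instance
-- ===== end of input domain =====

-- B replaces A's three filter passes + two .index rescans + pop-one-at-a-time loop by a
-- single first-index scan and one slice splice (simpler, one pass). Both Pythons mutate
-- `input` in place identically; the theorems here are about the returned list.


-- shared header predicates ("subject:" in i.lower(), etc.)
def isSubj (s : String) : Bool := PySem.Str.isIn "subject:" (PySem.Str.lower s)
def isCC (s : String) : Bool :=
  PySem.Str.isIn "cc:" (PySem.Str.lower s) && !PySem.Str.isIn "bcc:" (PySem.Str.lower s)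
    && !PySem.Str.isIn "x-cc:" (PySem.Str.lower s)
def isMime (s : String) : Bool := PySem.Str.isIn "mime-version:" (PySem.Str.lower s)

-- ===== PORT A =====
def joinSubjectHeaderToString (input : List String) (subjectLine : String) : List String :=
  let headerResult := input.filter isSubj
  let ccHeaderResult := input.filter isCC
  let mimeHeaderResult := input.filter isMime
  match headerResult with
  | [] => input                                   -- len(headerResult) == 0: return input unchanged
  | h0 :: _ =>
    let nIdx? : Option Nat :=
      match ccHeaderResult with
      | c0 :: _ => PySem.List.index? input c0
      | [] =>
        match mimeHeaderResult with
        | m0 :: _ => PySem.List.index? input m0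
        | [] => none                              -- Python raises IndexError (mimeHeaderResult[0])
    match PySem.List.index? input h0, nIdx? with
    | some hIdx, some nIdx =>
      -- for i in range(headerIndexInInput, nextHeaderIndexInInput): input.pop(headerIndexInInput)
      match (PySem.List.pyRange (hIdx : Int) (nIdx : Int) 1).foldl
              (fun st _ => st.bind fun ys => (PySem.List.pop? ys (hIdx : Int)).map Prod.snd)
              (some input) with
      | some popped => PySem.List.insert popped (hIdx : Int) subjectLine   -- input.insert(headerIndexInInput, subjectLine)
      | none => input                             -- unreachable: the pop index is always in range
    | _, _ => input                               -- unreachable: h0/c0/m0 are members of input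

-- ===== PORT B =====
-- single enumerate pass of Source B: first subject/cc/mime indices (none if absent)
def findHeaders : List String → Nat → Option Nat → Option Nat → Option Nat →
    Option Nat × Option Nat × Option Nat
  | [], _, s, c, m => (s, c, m)
  | x :: xs, i, s, c, m =>
    let s' := if s.isNone && isSubj x then some i else s
    let c' := if c.isNone && isCC x then some i else c
    let m' := if m.isNone && isMime x then some i else m
    findHeaders xs (i + 1) s' c' m'

def joinSubjectHeaderToString_alt (input : List String) (subjectLine : String) : List String :=
  match findHeaders input 0 none none none with
  | (none, _, _) => input
  | (some sIdx, c, m) =>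
    match c.or m with                              -- end = ccIdx if ccIdx is not None else mimeIdx
    | none => input
    | some e =>
      -- input[sIdx:e] = [subjectLine]; Python clamps the stop of the slice to ≥ its start
      input.take sIdx ++ subjectLine :: input.drop (max sIdx e)

-- ===== PRECONDITION & SPEC =====
-- Pre_ excludes exactly the inputs where A raises IndexError: a subject line present
-- but neither a cc line nor a mime-version line.
def Pre_joinSubjectHeaderToString (input : List String) (subjectLine : String) : Prop :=
  input.any isSubj = true → (input.any isCC = true ∨ input.any isMime = true)
instance (input : List String) (subjectLine : String) : Decidable (Pre_joinSubjectHeaderToString input subjectLine) := by unfold Pre_joinSubjectHeaderToString; infer_instance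
def pvWitness_joinSubjectHeaderToString : List String × String :=
  (["Subject: old", "line", "CC: bob"], "Subject: new")

-- A raises IndexError (mimeHeaderResult[0] on an empty list) when a 'subject:' line is
-- present but no cc and no mime-version line; B returns input unchanged there.
def Raises_joinSubjectHeaderToString (input : List String) (subjectLine : String) : Prop :=
  input.any isSubj = true ∧ input.any isCC = false ∧ input.any isMime = false
instance (input : List String) (subjectLine : String) : Decidable (Raises_joinSubjectHeaderToString input subjectLine) := by unfold Raises_joinSubjectHeaderToString; infer_instance
def pvRaiseWitness_joinSubjectHeaderToString : List String × String :=
  (["Subject: hi"], "Subject: new")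
def pvRaiseWitnessOut_joinSubjectHeaderToString : List String := ["Subject: hi"]

def Spec_joinSubjectHeaderToString (input : List String) (subjectLine : String) (out : List String) : Prop := out = joinSubjectHeaderToString_alt input subjectLine
instance (input : List String) (subjectLine : String) (out : List String) : Decidable (Spec_joinSubjectHeaderToString input subjectLine out) := by unfold Spec_joinSubjectHeaderToString; infer_instance

-- ===== CLAIM (what is proved, stated in full; the proofs are below) =====
def Claim_equal_joinSubjectHeaderToString : Prop := ∀ (input : List String) (subjectLine : String), Dom_joinSubjectHeaderToString input subjectLine → Pre_joinSubjectHeaderToString input subjectLine → Spec_joinSubjectHeaderToString input subjectLine (joinSubjectHeaderToString input subjectLine)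
def Claim_raises_joinSubjectHeaderToString : Prop := (∀ (input : List String) (subjectLine : String), Dom_joinSubjectHeaderToString input subjectLine → Raises_joinSubjectHeaderToString input subjectLine → ¬ Pre_joinSubjectHeaderToString input subjectLine) ∧ (Dom_joinSubjectHeaderToString (pvRaiseWitness_joinSubjectHeaderToString.1) (pvRaiseWitness_joinSubjectHeaderToString.2) ∧ Raises_joinSubjectHeaderToString (pvRaiseWitness_joinSubjectHeaderToString.1) (pvRaiseWitness_joinSubjectHeaderToString.2) ∧ joinSubjectHeaderToString_alt (pvRaiseWitness_joinSubjectHeaderToString.1) (pvRaiseWitness_joinSubjectHeaderToString.2) = pvRaiseWitnessOut_joinSubjectHeaderToString)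

-- ===== LEMMAS AND PROOFS =====

-- one scan step of findHeaders preserves "accumulator or first-match index"
theorem acc_step (p : String → Bool) (x : String) (xs : List String) (i : Nat) (s : Option Nat) :
    (if s.isNone && p x then some i else s).or ((xs.findIdx? p).map (· + (i+1)))
      = s.or ((((x::xs).findIdx? p)).map (· + i)) := by
  cases s with
  | some v => simp
  | none =>
    by_cases hp : p x <;>
      simp [List.findIdx?_cons, hp, Option.map_map, Function.comp_def, Nat.add_assoc, Nat.add_comm 1 i]

-- B's scan computes the three first-match indices
theorem findHeaders_eq (xs : List String) (i : Nat) (s c m : Option Nat) :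
    findHeaders xs i s c m =
      (s.or ((xs.findIdx? isSubj).map (· + i)),
       c.or ((xs.findIdx? isCC).map (· + i)),
       m.or ((xs.findIdx? isMime).map (· + i))) := by
  induction xs generalizing i s c m with
  | nil => simp [findHeaders]
  | cons x xs ih =>
    simp only [findHeaders]
    rw [ih]
    exact Prod.ext (acc_step isSubj x xs i s) (Prod.ext (acc_step isCC x xs i c) (acc_step isMime x xs i m))

-- A's input.index(filter(p)[0]) is the first index satisfying p
theorem index?_of_filter_cons {p : String → Bool} {xs : List String} {h : String} {t : List String}
    (hf : xs.filter p = h :: t) : PySem.List.index? xs h = xs.findIdx? p := by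
  induction xs generalizing t with
  | nil => simp at hf
  | cons x xs ih =>
    by_cases hp : p x
    · rw [List.filter_cons_of_pos hp] at hf
      obtain ⟨rfl, rfl⟩ : x = h ∧ List.filter p xs = t := by simpa using hf
      rw [PySem.List.index?_cons_self, List.findIdx?_cons]
      simp [hp]
    · rw [List.filter_cons_of_neg hp] at hf
      have hph : p h = true := (List.mem_filter.mp (hf ▸ List.mem_cons_self)).2
      have hne : x ≠ h := fun e => hp (e ▸ hph)
      rw [PySem.List.index?_cons_of_ne xs hne, List.findIdx?_cons, ih hf]
      simp [hp]

-- A's pop loop deletes the slice [a, a+k)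
theorem popLoop_eq (k : Nat) (xs : List String) (a : Nat) (hk : a + k ≤ xs.length) :
    (PySem.List.pyRange (a : Int) ((a + k : Nat) : Int) 1).foldl
      (fun st _ => st.bind fun ys => (PySem.List.pop? ys (a : Int)).map Prod.snd)
      (some xs) = some (xs.take a ++ xs.drop (a + k)) := by
  induction k with
  | zero => simp [PySem.List.pyRange_one_eq_nil]
  | succ k ih =>
    have h1 : ((a + (k+1) : Nat) : Int) = ((a + k : Nat) : Int) + 1 := by push_cast; ring
    rw [h1, PySem.List.pyRange_one_succ_right (by push_cast; omega), List.foldl_append,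
        ih (by omega)]
    have hlen : (xs.take a).length = a := by simp; omega
    have hlt : a < (xs.take a ++ xs.drop (a + k)).length := by simp; omega
    rw [List.foldl_cons, List.foldl_nil]
    rw [Option.bind_some, PySem.List.pop?_natCast _ a hlt]
    simp only [Option.map_some]
    congr 1
    rw [List.eraseIdx_append_of_length_le (le_of_eq hlen), hlen, Nat.sub_self,
        List.eraseIdx_zero, List.tail_drop, Nat.add_assoc]

theorem findIdx?_lt_length {p : String → Bool} {xs : List String} {k : Nat}
    (h : xs.findIdx? p = some k) : k < xs.length := by
  simpa using (List.findIdx?_eq_some_iff_findIdx_eq.mp h).1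

theorem filter_nil_iff {p : String → Bool} {xs : List String} :
    xs.filter p = [] ↔ xs.findIdx? p = none := by
  rw [List.filter_eq_nil_iff, List.findIdx?_eq_none_iff]
  simp

-- the pop loop with a clamped stop, as one slice deletion
theorem splice_foldl (input : List String) (sIdx e : Nat) (he : e ≤ input.length) :
    (PySem.List.pyRange (sIdx : Int) (e : Int) 1).foldl
      (fun st _ => st.bind fun ys => (PySem.List.pop? ys (sIdx : Int)).map Prod.snd)
      (some input) = some (input.take sIdx ++ input.drop (max sIdx e)) := by
  by_cases hle : e ≤ sIdx
  · rw [PySem.List.pyRange_one_eq_nil (by exact_mod_cast hle), List.foldl_nil,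
        Nat.max_eq_left hle, List.take_append_drop]
  · have h2 : e = sIdx + (e - sIdx) := by omega
    rw [Nat.max_eq_right (by omega), h2]
    exact popLoop_eq (e - sIdx) input sIdx (by omega)

theorem insert_splice (input : List String) (L : String) (sIdx m : Nat)
    (h : sIdx ≤ input.length) :
    PySem.List.insert (input.take sIdx ++ input.drop m) (sIdx : Int) L
      = input.take sIdx ++ L :: input.drop m := by
  have hlen : (input.take sIdx).length = sIdx := by simp; omega
  rw [PySem.List.insert_natCast _ sIdx L (by simp; omega),
      List.take_left' hlen, List.drop_left' hlen]

theorem any_of_filter_cons {p : String → Bool} {xs : List String} {h : String} {t : List String}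
    (hf : xs.filter p = h :: t) : xs.any p = true := by
  rcases List.mem_filter.mp (hf ▸ List.mem_cons_self) with ⟨hmem, hp⟩
  exact List.any_eq_true.mpr ⟨h, hmem, hp⟩

theorem map_add_zero (o : Option Nat) : o.map (· + 0) = o := by cases o <;> rfl

theorem ports_agree (input : List String) (L : String)
    (pre : input.any isSubj = true → (input.any isCC = true ∨ input.any isMime = true)) :
    joinSubjectHeaderToString input L = joinSubjectHeaderToString_alt input L := by
  unfold joinSubjectHeaderToString joinSubjectHeaderToString_alt
  rw [findHeaders_eq]
  simp only [map_add_zero, Option.none_or]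
  cases hs : input.findIdx? isSubj with
  | none =>
    rw [filter_nil_iff.mpr hs]
  | some sIdx =>
    have hsl : sIdx < input.length := findIdx?_lt_length hs
    obtain ⟨h0, t0, hA⟩ : ∃ h0 t0, input.filter isSubj = h0 :: t0 := by
      cases hfA : input.filter isSubj with
      | nil => rw [filter_nil_iff.mp hfA] at hs; cases hs
      | cons a b => exact ⟨a, b, rfl⟩
    have hidx : PySem.List.index? input h0 = some sIdx := by
      rw [index?_of_filter_cons hA, hs]
    rw [hA]; dsimp only
    rw [hidx]
    cases hc : input.findIdx? isCC with
    | some cIdx =>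
      obtain ⟨c0, tc, hC⟩ : ∃ c0 tc, input.filter isCC = c0 :: tc := by
        cases hfC : input.filter isCC with
        | nil => rw [filter_nil_iff.mp hfC] at hc; cases hc
        | cons a b => exact ⟨a, b, rfl⟩
      rw [hC]; dsimp only
      rw [index?_of_filter_cons hC, hc]; dsimp only
      have hcl : cIdx < input.length := findIdx?_lt_length hc
      rw [splice_foldl input sIdx cIdx (by omega)]
      dsimp only [Option.some_or]
      exact insert_splice input L sIdx (max sIdx cIdx) (by omega)
    | none =>
      rw [filter_nil_iff.mpr hc]; dsimp only
      cases hm : input.findIdx? isMime with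
      | some mIdx =>
        obtain ⟨m0, tm, hM⟩ : ∃ m0 tm, input.filter isMime = m0 :: tm := by
          cases hfM : input.filter isMime with
          | nil => rw [filter_nil_iff.mp hfM] at hm; cases hm
          | cons a b => exact ⟨a, b, rfl⟩
        rw [hM]; dsimp only
        rw [index?_of_filter_cons hM, hm]; dsimp only
        have hml : mIdx < input.length := findIdx?_lt_length hm
        rw [splice_foldl input sIdx mIdx (by omega)]
        dsimp only [Option.none_or]
        exact insert_splice input L sIdx (max sIdx mIdx) (by omega)
      | none =>
        exfalso
        rcases pre (any_of_filter_cons hA) with h | h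
        · rcases List.any_eq_true.mp h with ⟨x, hx, hpx⟩
          have hfalse := List.findIdx?_eq_none_iff.mp hc x hx
          simp [hpx] at hfalse
        · rcases List.any_eq_true.mp h with ⟨x, hx, hpx⟩
          have hfalse := List.findIdx?_eq_none_iff.mp hm x hx
          simp [hpx] at hfalse

-- ===== VERDICT (by name: the statement is the Claim_ definition above) =====
theorem joinSubjectHeaderToString_spec : Claim_equal_joinSubjectHeaderToString := by
  intro input subjectLine _dom pre
  unfold Spec_joinSubjectHeaderToString
  exact ports_agree input subjectLine pre

@[simp] theorem joinSubjectHeaderToString_raises : Claim_raises_joinSubjectHeaderToString := by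
  unfold Claim_raises_joinSubjectHeaderToString
  refine ⟨?_, by decide⟩
  intro input subjectLine _ hr hpre
  rcases hr with ⟨hs, hc, hm⟩
  rcases hpre hs with h | h <;> simp_all
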